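-- pv_equiv track=rewrite | github.com/Satyam-Captain/OpsCore | services/adapters/scripts_mock.py | _strip_prior_generated_block
-- ===== SOURCE A (Python) =====
-- MARKER_START = "--- BEGIN OpsCore ELIM generated block ---"
--
-- MARKER_START_LS = "--- BEGIN OpsCore LS generated block ---"
--
-- def _strip_prior_generated_block(content: str) -> str:
--     """Remove appended mock blocks (ELIM or LS) before re-generation."""
--     while True:
--         stripped = False
--         for start in (MARKER_START_LS + "\n", MARKER_START + "\n"):
--             idx = content.find(start)
--             if idx != -1:
--                 content = content[:idx].rstrip()
--                 stripped = True
--                 break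
--         if not stripped:
--             return content
-- ===== SOURCE B (Python) =====
-- MARKER_START = "--- BEGIN OpsCore ELIM generated block ---"
--
-- MARKER_START_LS = "--- BEGIN OpsCore LS generated block ---"
--
-- def _strip_prior_generated_block(content: str) -> str:
--     """Remove appended mock blocks (ELIM or LS) before re-generation."""
--     hits = [i for i in (content.find(MARKER_START_LS + "\n"),
--                         content.find(MARKER_START + "\n")) if i != -1]
--     if not hits:
--         return content
--     return content[:min(hits)].rstrip()
-- ===== Notes on version B (the rewrite author's own statement) =====
-- stated objective: simpler
-- what changed: Replaces A's find-truncate-rstrip fixpoint loop with a single cut: take the earliest of the two marker positions (if any) and return the rstripped prefix before it.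
-- intended difference: When an ELIM marker block precedes an LS marker and only whitespace separates the end of the ELIM marker line from the LS marker, A truncates at the LS marker first and its rstrip eats the ELIM marker's trailing newline, so A returns text still ending in the dangling ELIM marker line; B cuts at the earliest marker and returns the rstripped text before it, which is the intended removal of all generated blocks. — e.g. on _strip_prior_generated_block("--- BEGIN OpsCore ELIM generated block ---\n--- BEGIN OpsCore LS generated block ---\n"): A returns "--- BEGIN OpsCore ELIM generated block ---", B returns ""
import Mathlib
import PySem

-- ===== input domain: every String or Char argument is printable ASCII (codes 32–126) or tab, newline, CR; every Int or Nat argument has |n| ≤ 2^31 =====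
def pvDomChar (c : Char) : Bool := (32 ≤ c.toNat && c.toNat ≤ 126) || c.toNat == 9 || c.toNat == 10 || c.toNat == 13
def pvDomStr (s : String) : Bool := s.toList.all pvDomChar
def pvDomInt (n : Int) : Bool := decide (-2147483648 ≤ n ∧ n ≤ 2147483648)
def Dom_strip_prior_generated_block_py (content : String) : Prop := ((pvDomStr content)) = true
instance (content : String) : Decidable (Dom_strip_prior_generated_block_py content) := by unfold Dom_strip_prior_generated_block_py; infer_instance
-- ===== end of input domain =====

-- B replaces A's find-truncate-rstrip fixpoint loop with a single cut at the earliest marker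
-- occurrence (objective: simpler); on inputs where an ELIM block precedes an LS marker with only
-- whitespace in between, A leaves a dangling ELIM marker line and B removes it (see D_ below).

-- ===== PORT A =====
-- the two search patterns MARKER_START_LS + "\n" and MARKER_START + "\n"; the constant-folded
-- concatenation is spelled as one literal (a '++' of string literals is opaque to kernel reduction)
def pvmLS : List Char := "--- BEGIN OpsCore LS generated block ---\n".toList
def pvmEL : List Char := "--- BEGIN OpsCore ELIM generated block ---\n".toList

-- while True: find LS-marker, else ELIM-marker; truncate before it and rstrip; stop when neither
-- occurs.  The loop is run on a fuel of length+1: every truncation removes at least the marker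
-- itself (41 chars), so the fuel can never run out before the loop stops by itself.
def pvStripGo : Nat → List Char → List Char
  | 0, cs => cs
  | f + 1, cs =>
    if PySem.Chars.find cs pvmLS ≠ -1 then
      pvStripGo f (PySem.Chars.rstrip (PySem.List.slice cs none (some (PySem.Chars.find cs pvmLS))))
    else if PySem.Chars.find cs pvmEL ≠ -1 then
      pvStripGo f (PySem.Chars.rstrip (PySem.List.slice cs none (some (PySem.Chars.find cs pvmEL))))
    else cs

def strip_prior_generated_block_py (content : String) : String :=
  String.ofList (pvStripGo (content.toList.length + 1) content.toList)

-- ===== PORT B =====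
-- hits = [i for i in (find LS-marker, find ELIM-marker) if i != -1]; if none: unchanged;
-- else content[:min(hits)].rstrip()
def strip_prior_generated_block_py_alt (content : String) : String :=
  let hits := [PySem.Chars.find content.toList pvmLS,
               PySem.Chars.find content.toList pvmEL].filter (fun i => i != -1)
  match PySem.List.min? hits (fun i => i) with
  | none => content
  | some m => String.ofList (PySem.Chars.rstrip (PySem.List.slice content.toList none (some m)))

-- ===== PRECONDITION & SPEC =====
-- When an ELIM marker block precedes an LS marker and only whitespace separates the end of the
-- ELIM marker line from the LS marker, A truncates at the LS marker first and its rstrip eats the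
-- ELIM marker's trailing newline, so A returns text still ending in the dangling ELIM marker line;
-- B cuts at the earliest marker and returns the rstripped text before it, which is the intended
-- removal of all generated blocks.
def D_strip_prior_generated_block_py (content : String) : Prop :=
  0 ≤ PySem.Chars.find content.toList pvmEL ∧
  PySem.Chars.find content.toList pvmEL < PySem.Chars.find content.toList pvmLS ∧
  ((content.toList.take (PySem.Chars.find content.toList pvmLS).toNat).drop
      ((PySem.Chars.find content.toList pvmEL).toNat + 43)).all PySem.Chars.isspace = true
instance (content : String) : Decidable (D_strip_prior_generated_block_py content) := by
  unfold D_strip_prior_generated_block_py; infer_instance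

def Spec_strip_prior_generated_block_py (content : String) (out : String) : Prop :=
  ¬ D_strip_prior_generated_block_py content → out = strip_prior_generated_block_py_alt content
instance (content : String) (out : String) : Decidable (Spec_strip_prior_generated_block_py content out) := by
  unfold Spec_strip_prior_generated_block_py; infer_instance

def pvDiffWitness_strip_prior_generated_block_py : String :=
  "--- BEGIN OpsCore ELIM generated block ---\n--- BEGIN OpsCore LS generated block ---\n"
def pvDiffWitnessOut_strip_prior_generated_block_py : String × String :=
  ("--- BEGIN OpsCore ELIM generated block ---", "")

-- ===== CLAIM (what is proved, stated in full; the proofs are below) =====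
def Claim_unchanged_strip_prior_generated_block_py : Prop := ∀ (content : String), Dom_strip_prior_generated_block_py content → Spec_strip_prior_generated_block_py content (strip_prior_generated_block_py content)
def Claim_changed_strip_prior_generated_block_py : Prop := Dom_strip_prior_generated_block_py (pvDiffWitness_strip_prior_generated_block_py) ∧ D_strip_prior_generated_block_py (pvDiffWitness_strip_prior_generated_block_py) ∧ strip_prior_generated_block_py (pvDiffWitness_strip_prior_generated_block_py) = pvDiffWitnessOut_strip_prior_generated_block_py.1 ∧ strip_prior_generated_block_py_alt (pvDiffWitness_strip_prior_generated_block_py) = pvDiffWitnessOut_strip_prior_generated_block_py.2 ∧ pvDiffWitnessOut_strip_prior_generated_block_py.1 ≠ pvDiffWitnessOut_strip_prior_generated_block_py.2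
def Claim_exact_strip_prior_generated_block_py : Prop := ∀ (content : String), Dom_strip_prior_generated_block_py content → D_strip_prior_generated_block_py content → strip_prior_generated_block_py content ≠ strip_prior_generated_block_py_alt content

-- ===== LEMMAS AND PROOFS =====

-- rstrip is a prefix of its argument
lemma pv_rstrip_prefix (cs : List Char) : PySem.Chars.rstrip cs <+: cs := by
  have h := List.dropWhile_suffix (l := cs.reverse) PySem.Chars.isspace
  have := List.reverse_prefix.mpr h
  simpa using this

lemma pv_rstrip_length_le (cs : List Char) :
    (PySem.Chars.rstrip cs).length ≤ cs.length :=
  (pv_rstrip_prefix cs).length_le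

-- one unfolding of the fuelled loop
lemma pv_go_succ (f : Nat) (cs : List Char) : pvStripGo (f + 1) cs =
    if PySem.Chars.find cs pvmLS ≠ -1 then
      pvStripGo f (PySem.Chars.rstrip (PySem.List.slice cs none (some (PySem.Chars.find cs pvmLS))))
    else if PySem.Chars.find cs pvmEL ≠ -1 then
      pvStripGo f (PySem.Chars.rstrip (PySem.List.slice cs none (some (PySem.Chars.find cs pvmEL))))
    else cs := rfl

-- an occurrence inside a take is an occurrence in the whole list
lemma pv_occ_of_occ_take {sub cs : List Char} {k q : Nat}
    (h : sub <+: (cs.take k).drop q) : sub <+: cs.drop q := by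
  rw [List.drop_take] at h
  exact h.trans (List.take_prefix _ _)

lemma pv_occ_take_len {sub cs : List Char} {k q : Nat} (hs : sub ≠ [])
    (h : sub <+: (cs.take k).drop q) : q + sub.length ≤ k := by
  have hl := h.length_le
  have hsl : 1 ≤ sub.length := by
    cases sub with
    | nil => simp at hs
    | cons a t => simp
  simp only [List.length_drop, List.length_take] at hl
  omega

lemma pv_occ_in_take {sub cs : List Char} {k q : Nat}
    (h : sub <+: cs.drop q) (hk : q + sub.length ≤ k) : sub <+: (cs.take k).drop q := by
  rw [List.drop_take, List.prefix_take_iff]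
  exact ⟨h, by omega⟩

lemma pv_infix_iff_occ (sub cs : List Char) : sub <:+: cs ↔ ∃ q, sub <+: cs.drop q := by
  rw [← PySem.Chars.isIn_iff_infix, ← PySem.Chars.exists_prefix_drop_iff_isIn]

lemma pv_find_eq_coe_of_first {cs sub : List Char} {e : Nat}
    (h1 : sub <+: cs.drop e) (h2 : ∀ q < e, ¬ sub <+: cs.drop q) :
    PySem.Chars.find cs sub = (e : Int) := by
  have h0 : 0 ≤ PySem.Chars.find cs sub :=
    (PySem.Chars.find_nonneg_iff cs sub).mpr ((pv_infix_iff_occ sub cs).mpr ⟨e, h1⟩)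
  obtain ⟨ho, hmin⟩ := PySem.Chars.find_spec h0
  rcases lt_trichotomy (PySem.Chars.find cs sub).toNat e with h | h | h
  · exact absurd ho (h2 _ h)
  · omega
  · exact absurd h1 (hmin _ h)

lemma pv_find_take_neg {cs sub : List Char} {k : Nat} (hs : sub ≠ [])
    (h : ∀ q, sub <+: cs.drop q → q + sub.length ≤ k → False) :
    PySem.Chars.find (cs.take k) sub = -1 := by
  rw [PySem.Chars.find_eq_neg_one_iff]
  intro hin
  obtain ⟨q, hq⟩ := (pv_infix_iff_occ sub (cs.take k)).mp hin
  exact h q (pv_occ_of_occ_take hq) (pv_occ_take_len hs hq)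

lemma pv_find_take_pos {cs sub : List Char} {k e : Nat}
    (h1 : sub <+: cs.drop e) (hmin : ∀ q < e, ¬ sub <+: cs.drop q)
    (hk : e + sub.length ≤ k) :
    PySem.Chars.find (cs.take k) sub = (e : Int) :=
  pv_find_eq_coe_of_first (pv_occ_in_take h1 hk)
    (fun q hq hc => hmin q hq (pv_occ_of_occ_take hc))

-- rstrip keeps every position up to the last non-space character
lemma pv_rstrip_keep {cs : List Char} {p : Nat} (hp : p < cs.length)
    (hw : PySem.Chars.isspace cs[p] = false) : p < (PySem.Chars.rstrip cs).length := by
  have hsplit := List.takeWhile_append_dropWhile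
    (p := PySem.Chars.isspace) (l := cs.reverse)
  have hlen : (List.takeWhile PySem.Chars.isspace cs.reverse).length
      + (List.dropWhile PySem.Chars.isspace cs.reverse).length = cs.length := by
    have h' := congrArg List.length hsplit
    simp only [List.length_append, List.length_reverse] at h'
    exact h'
  have ht : (List.takeWhile PySem.Chars.isspace cs.reverse).length ≤ cs.length - 1 - p := by
    by_contra hgt
    rw [not_le] at hgt
    have hidx : cs.length - 1 - p < (List.takeWhile PySem.Chars.isspace cs.reverse).length := hgt
    have hmem := List.getElem_mem hidx
    have hsp := List.mem_takeWhile_imp hmem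
    have hpre := List.takeWhile_prefix (l := cs.reverse) PySem.Chars.isspace
    have hrevlen : cs.length - 1 - p < cs.reverse.length := by
      simp only [List.length_reverse]; omega
    have hget : (List.takeWhile PySem.Chars.isspace cs.reverse)[cs.length - 1 - p]
        = cs.reverse[cs.length - 1 - p]'hrevlen := hpre.getElem hidx
    have hrev : cs.reverse[cs.length - 1 - p]'hrevlen = cs[p] := by
      rw [List.getElem_reverse]
      congr 1
      omega
    rw [hget, hrev, hw] at hsp
    exact absurd hsp (by simp)
  show p < ((List.dropWhile PySem.Chars.isspace cs.reverse).reverse).length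
  simp only [List.length_reverse]
  omega

lemma pv_rstrip_append_spaces (xs ys : List Char)
    (h : ∀ c ∈ ys, PySem.Chars.isspace c = true) :
    PySem.Chars.rstrip (xs ++ ys) = PySem.Chars.rstrip xs := by
  show (List.dropWhile PySem.Chars.isspace (xs ++ ys).reverse).reverse
      = (List.dropWhile PySem.Chars.isspace xs.reverse).reverse
  rw [List.reverse_append, List.dropWhile_append]
  have h0 : List.dropWhile PySem.Chars.isspace ys.reverse = [] :=
    List.dropWhile_eq_nil_iff.mpr (fun x hx => h x (List.mem_reverse.mp hx))
  simp [h0]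

lemma pv_rstrip_concat_not_space (xs : List Char) (c : Char)
    (hc : PySem.Chars.isspace c = false) :
    PySem.Chars.rstrip (xs ++ [c]) = xs ++ [c] := by
  show (List.dropWhile PySem.Chars.isspace (xs ++ [c]).reverse).reverse = xs ++ [c]
  rw [List.reverse_append]
  simp [hc]

-- the LS marker cannot start strictly inside an ELIM marker occurrence
set_option maxRecDepth 4000 in
lemma pv_no_overlap {cs : List Char} {e l : Nat}
    (he : pvmEL <+: cs.drop e) (hl : pvmLS <+: cs.drop l) (hlt : e < l) :
    e + 43 ≤ l := by
  by_contra hcon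
  rw [not_le] at hcon
  have key : ∀ d < 43, 1 ≤ d → ∃ k, k < 41 ∧ d + k < 43 ∧ pvmLS[k]? ≠ pvmEL[d + k]? := by decide
  obtain ⟨k, hk41, hdk, hne⟩ := key (l - e) (by omega) (by omega)
  apply hne
  obtain ⟨tL, htL⟩ := hl
  obtain ⟨tE, htE⟩ := he
  have h1 : pvmLS[k]? = cs[l + k]? := by
    have h' := List.getElem?_append_left (l₁ := pvmLS) (l₂ := tL) (i := k)
      (by rw [show pvmLS.length = 41 from by decide]; omega)
    rw [htL, List.getElem?_drop] at h'
    exact h'.symm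
  have h2 : pvmEL[(l - e) + k]? = cs[e + ((l - e) + k)]? := by
    have h' := List.getElem?_append_left (l₁ := pvmEL) (l₂ := tE) (i := (l - e) + k)
      (by rw [show pvmEL.length = 43 from by decide]; omega)
    rw [htE, List.getElem?_drop] at h'
    exact h'.symm
  rw [h1, h2]
  congr 1
  omega

-- A's loop stops at once (with any fuel left) when neither marker occurs
lemma pv_go_fix {cs : List Char} (h1 : PySem.Chars.find cs pvmLS = -1)
    (h2 : PySem.Chars.find cs pvmEL = -1) (f : Nat) (hf : 1 ≤ f) : pvStripGo f cs = cs := by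
  obtain ⟨f', rfl⟩ : ∃ f', f = f' + 1 := ⟨f - 1, by omega⟩
  rw [pv_go_succ]
  simp [h1, h2]

-- after a cut below every marker occurrence, A's loop stops at once
lemma pv_go_cut_fix {cs : List Char} {k : Nat}
    (hLS : ∀ q, pvmLS <+: cs.drop q → q + 41 ≤ k → False)
    (hEL : ∀ q, pvmEL <+: cs.drop q → q + 43 ≤ k → False) (f : Nat) (hf : 1 ≤ f) :
    pvStripGo f (PySem.Chars.rstrip (cs.take k)) = PySem.Chars.rstrip (cs.take k) := by
  have hpre := pv_rstrip_prefix (cs.take k)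
  obtain ⟨m, hm, hmk⟩ : ∃ m, PySem.Chars.rstrip (cs.take k) = cs.take m ∧ m ≤ k := by
    refine ⟨min (PySem.Chars.rstrip (cs.take k)).length k, ?_, min_le_right _ _⟩
    conv_lhs => rw [List.prefix_iff_eq_take.mp hpre]
    rw [List.take_take]
  rw [hm]
  refine pv_go_fix ?_ ?_ f hf
  · apply pv_find_take_neg (by decide)
    intro q hocc hlen
    have h41 : pvmLS.length = 41 := by decide
    exact hLS q hocc (by omega)
  · apply pv_find_take_neg (by decide)
    intro q hocc hlen
    have h43 : pvmEL.length = 43 := by decide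
    exact hEL q hocc (by omega)

-- an occurrence somewhere contradicts find = -1
lemma pv_not_occ_of_find_neg {cs sub : List Char} (h : PySem.Chars.find cs sub = -1)
    (q : Nat) (hocc : sub <+: cs.drop q) : False := by
  rw [PySem.Chars.find_eq_neg_one_iff] at h
  exact h ((pv_infix_iff_occ _ _).mpr ⟨q, hocc⟩)

-- evaluations of B's port under the four find outcomes
lemma pv_alt_none {content : String}
    (hL : PySem.Chars.find content.toList pvmLS = -1)
    (hE : PySem.Chars.find content.toList pvmEL = -1) :
    strip_prior_generated_block_py_alt content = content := by
  unfold strip_prior_generated_block_py_alt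
  simp [hL, hE, PySem.List.min?]

lemma pv_alt_eval_E {content : String}
    (hL : PySem.Chars.find content.toList pvmLS = -1)
    (hE : PySem.Chars.find content.toList pvmEL ≠ -1) :
    strip_prior_generated_block_py_alt content
      = String.ofList (PySem.Chars.rstrip (PySem.List.slice content.toList none
          (some (PySem.Chars.find content.toList pvmEL)))) := by
  unfold strip_prior_generated_block_py_alt
  simp [hL, hE, PySem.List.min?]

lemma pv_alt_eval_L {content : String}
    (hL : PySem.Chars.find content.toList pvmLS ≠ -1)
    (hE : PySem.Chars.find content.toList pvmEL = -1) :
    strip_prior_generated_block_py_alt content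
      = String.ofList (PySem.Chars.rstrip (PySem.List.slice content.toList none
          (some (PySem.Chars.find content.toList pvmLS)))) := by
  unfold strip_prior_generated_block_py_alt
  simp [hL, hE, PySem.List.min?]

lemma pv_alt_eval_both {content : String}
    (hL : PySem.Chars.find content.toList pvmLS ≠ -1)
    (hE : PySem.Chars.find content.toList pvmEL ≠ -1) :
    strip_prior_generated_block_py_alt content
      = String.ofList (PySem.Chars.rstrip (PySem.List.slice content.toList none
          (some (if PySem.Chars.find content.toList pvmEL < PySem.Chars.find content.toList pvmLS
                 then PySem.Chars.find content.toList pvmEL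
                 else PySem.Chars.find content.toList pvmLS)))) := by
  unfold strip_prior_generated_block_py_alt
  simp [hL, hE, PySem.List.min?]
  split_ifs <;> rfl

-- ===== VERDICT (by name: the statement is the Claim_ definition above) =====
set_option maxHeartbeats 1000000 in
theorem strip_prior_generated_block_py_spec : Claim_unchanged_strip_prior_generated_block_py := by
  intro content _hdom hnD
  show String.ofList (pvStripGo (content.toList.length + 1) content.toList)
      = strip_prior_generated_block_py_alt content
  have hLb := PySem.Chars.neg_one_le_find content.toList pvmLS
  have hEb := PySem.Chars.neg_one_le_find content.toList pvmEL
  by_cases hL : PySem.Chars.find content.toList pvmLS = -1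
  · by_cases hE : PySem.Chars.find content.toList pvmEL = -1
    · rw [pv_go_fix hL hE _ (by omega), pv_alt_none hL hE, String.ofList_toList]
    · -- only the ELIM marker occurs: one truncation at its first occurrence
      have he0 : 0 ≤ PySem.Chars.find content.toList pvmEL := by omega
      obtain ⟨heocc, hemin⟩ := PySem.Chars.find_spec he0
      have hlen1 : 43 ≤ content.toList.length := by
        have h' := heocc.length_le
        rw [show pvmEL.length = 43 from by decide] at h'
        simp only [List.length_drop] at h'
        omega
      rw [pv_alt_eval_E hL hE, pv_go_succ, if_neg (not_not_intro hL), if_pos hE,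
        PySem.List.slice_to _ he0]
      congr 1
      exact pv_go_cut_fix
        (fun q hocc _ => pv_not_occ_of_find_neg hL q hocc)
        (fun q hocc hq => hemin q (by omega) hocc)
        content.toList.length (by omega)
  · have hl0 : 0 ≤ PySem.Chars.find content.toList pvmLS := by omega
    obtain ⟨hlocc, hlmin⟩ := PySem.Chars.find_spec hl0
    by_cases hE : PySem.Chars.find content.toList pvmEL = -1
    · -- only the LS marker occurs: one truncation at its first occurrence
      have hlen1 : 41 ≤ content.toList.length := by
        have h' := hlocc.length_le
        rw [show pvmLS.length = 41 from by decide] at h'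
        simp only [List.length_drop] at h'
        omega
      rw [pv_alt_eval_L hL hE, pv_go_succ, if_pos hL,
        PySem.List.slice_to _ hl0]
      congr 1
      exact pv_go_cut_fix
        (fun q hocc hq => hlmin q (by omega) hocc)
        (fun q hocc _ => pv_not_occ_of_find_neg hE q hocc)
        content.toList.length (by omega)
    · -- both markers occur
      have he0 : 0 ≤ PySem.Chars.find content.toList pvmEL := by omega
      obtain ⟨heocc, hemin⟩ := PySem.Chars.find_spec he0
      rcases lt_trichotomy (PySem.Chars.find content.toList pvmEL)
          (PySem.Chars.find content.toList pvmLS) with hlt | heq | hgt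
      · -- ELIM strictly first; outside D_ some non-space char sits between the two markers
        have hltn : (PySem.Chars.find content.toList pvmEL).toNat
            < (PySem.Chars.find content.toList pvmLS).toNat := by omega
        have hover := pv_no_overlap heocc hlocc hltn
        have hlnlen : (PySem.Chars.find content.toList pvmLS).toNat
            ≤ content.toList.length := by
          have := PySem.Chars.find_le_length content.toList pvmLS
          omega
        have hall : ¬ (((content.toList.take
              (PySem.Chars.find content.toList pvmLS).toNat).drop
              ((PySem.Chars.find content.toList pvmEL).toNat + 43)).all
              PySem.Chars.isspace = true) := by
          intro h
          exact hnD ⟨he0, hlt, h⟩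
        rw [List.all_eq_true] at hall
        push Not at hall
        obtain ⟨x, hxmem, hxsp⟩ := hall
        obtain ⟨i, hi, hxi⟩ := List.mem_iff_getElem.mp hxmem
        have hseg : ((content.toList.take
              (PySem.Chars.find content.toList pvmLS).toNat).drop
              ((PySem.Chars.find content.toList pvmEL).toNat + 43)).length
            = (PySem.Chars.find content.toList pvmLS).toNat
              - ((PySem.Chars.find content.toList pvmEL).toNat + 43) := by
          simp only [List.length_drop, List.length_take]
          omega
        have hp : (PySem.Chars.find content.toList pvmEL).toNat + 43 + i
            < (PySem.Chars.find content.toList pvmLS).toNat := by omega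
        have hplen : (PySem.Chars.find content.toList pvmEL).toNat + 43 + i
            < content.toList.length := by omega
        have hxval : x = content.toList[(PySem.Chars.find content.toList pvmEL).toNat + 43 + i] := by
          rw [← hxi, List.getElem_drop, List.getElem_take]
        have hlen43 : 43 ≤ content.toList.length := by
          have h' := heocc.length_le
          rw [show pvmEL.length = 43 from by decide] at h'
          simp only [List.length_drop] at h'
          omega
        rw [pv_alt_eval_both hL hE, if_pos hlt, pv_go_succ, if_pos hL,
          PySem.List.slice_to _ hl0, PySem.List.slice_to _ he0]
        have hkeep := pv_rstrip_keep
          (cs := content.toList.take (PySem.Chars.find content.toList pvmLS).toNat)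
          (p := (PySem.Chars.find content.toList pvmEL).toNat + 43 + i)
          (by simp only [List.length_take]; omega)
          (by rw [List.getElem_take, ← hxval]; simp only [Bool.not_eq_true] at hxsp; exact hxsp)
        have hpre := pv_rstrip_prefix
          (content.toList.take (PySem.Chars.find content.toList pvmLS).toNat)
        obtain ⟨j, hj, hj1, hj2⟩ : ∃ j,
            PySem.Chars.rstrip (content.toList.take
              (PySem.Chars.find content.toList pvmLS).toNat) = content.toList.take j ∧
            (PySem.Chars.find content.toList pvmEL).toNat + 43 ≤ j ∧
            j ≤ (PySem.Chars.find content.toList pvmLS).toNat := by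
          refine ⟨min (PySem.Chars.rstrip (content.toList.take
              (PySem.Chars.find content.toList pvmLS).toNat)).length
              (PySem.Chars.find content.toList pvmLS).toNat, ?_, ?_, min_le_right _ _⟩
          · conv_lhs => rw [List.prefix_iff_eq_take.mp hpre]
            rw [List.take_take]
          · have hle := hpre.length_le
            simp only [List.length_take] at hle
            omega
        obtain ⟨f1, hf1⟩ : ∃ f1, content.toList.length = f1 + 1 :=
          ⟨content.toList.length - 1, by omega⟩
        rw [hj, hf1, pv_go_succ,
          if_neg (not_not_intro (pv_find_take_neg (by decide)
            (fun q hocc hq => hlmin q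
              (by rw [show pvmLS.length = 41 from by decide] at hq; omega) hocc))),
          if_pos (by
            rw [pv_find_take_pos heocc hemin
              (by rw [show pvmEL.length = 43 from by decide]; omega)]
            omega),
          pv_find_take_pos heocc hemin
            (by rw [show pvmEL.length = 43 from by decide]; omega),
          PySem.List.slice_to _ (Int.natCast_nonneg _), Int.toNat_natCast, List.take_take,
          min_eq_left (by omega)]
        congr 1
        exact pv_go_cut_fix
          (fun q hocc hq => hlmin q (by omega) hocc)
          (fun q hocc hq => hemin q (by omega) hocc)
          f1 (by omega)
      · -- equal first indices are impossible: one marker would be a prefix of the other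
        exfalso
        rw [heq] at heocc
        have hpp := List.prefix_of_prefix_length_le hlocc heocc
          (by rw [show pvmLS.length = 41 from by decide,
                  show pvmEL.length = 43 from by decide]; omega)
        exact absurd hpp (by decide)
      · -- LS strictly first: one truncation at the LS occurrence
        have hlen1 : 41 ≤ content.toList.length := by
          have h' := hlocc.length_le
          rw [show pvmLS.length = 41 from by decide] at h'
          simp only [List.length_drop] at h'
          omega
        rw [pv_alt_eval_both hL hE, if_neg (by omega), pv_go_succ, if_pos hL,
          PySem.List.slice_to _ hl0]
        congr 1
        exact pv_go_cut_fix
          (fun q hocc hq => hlmin q (by omega) hocc)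
          (fun q hocc hq => hemin q (by omega) hocc)
          content.toList.length (by omega)

theorem strip_prior_generated_block_py_changed : Claim_changed_strip_prior_generated_block_py := by
  unfold Claim_changed_strip_prior_generated_block_py
  exact ⟨by decide, by decide, by decide, by decide, by decide⟩

set_option maxHeartbeats 1000000 in
theorem strip_prior_generated_block_py_tight : Claim_exact_strip_prior_generated_block_py := by
  intro content _hdom hD
  obtain ⟨he0, hlt, hall⟩ := hD
  have hl0 : 0 ≤ PySem.Chars.find content.toList pvmLS := le_trans he0 (le_of_lt hlt)
  obtain ⟨heocc, hemin⟩ := PySem.Chars.find_spec he0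
  obtain ⟨hlocc, hlmin⟩ := PySem.Chars.find_spec hl0
  have hL : PySem.Chars.find content.toList pvmLS ≠ -1 := by omega
  have hE : PySem.Chars.find content.toList pvmEL ≠ -1 := by omega
  have hltn : (PySem.Chars.find content.toList pvmEL).toNat
      < (PySem.Chars.find content.toList pvmLS).toNat := by omega
  have hover := pv_no_overlap heocc hlocc hltn
  have helen : (PySem.Chars.find content.toList pvmEL).toNat + 43 ≤ content.toList.length := by
    have h' := heocc.length_le
    rw [show pvmEL.length = 43 from by decide] at h'
    simp only [List.length_drop] at h'
    omega
  have hlnlen : (PySem.Chars.find content.toList pvmLS).toNat ≤ content.toList.length := by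
    have := PySem.Chars.find_le_length content.toList pvmLS
    omega
  -- characters inside the ELIM occurrence
  have hgq : ∀ i, i < 43 →
      content.toList[(PySem.Chars.find content.toList pvmEL).toNat + i]? = pvmEL[i]? := by
    intro i hi
    obtain ⟨t, ht⟩ := heocc
    rw [← List.getElem?_drop, ← ht,
      List.getElem?_append_left (by rw [show pvmEL.length = 43 from by decide]; omega)]
  have hv42 : content.toList[(PySem.Chars.find content.toList pvmEL).toNat + 42]'(by omega)
      = '\n' := by
    have hq := hgq 42 (by omega)
    rw [List.getElem?_eq_getElem (by omega),
      show pvmEL[(42 : Nat)]? = some '\n' from by decide] at hq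
    exact Option.some.inj hq
  have hv41 : content.toList[(PySem.Chars.find content.toList pvmEL).toNat + 41]'(by omega)
      = '-' := by
    have hq := hgq 41 (by omega)
    rw [List.getElem?_eq_getElem (by omega),
      show pvmEL[(41 : Nat)]? = some '-' from by decide] at hq
    exact Option.some.inj hq
  -- the first truncation collapses to content[:e+42]
  have hsplit : content.toList.take (PySem.Chars.find content.toList pvmLS).toNat
      = content.toList.take ((PySem.Chars.find content.toList pvmEL).toNat + 42)
        ++ (content.toList.take (PySem.Chars.find content.toList pvmLS).toNat).drop
            ((PySem.Chars.find content.toList pvmEL).toNat + 42) := by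
    conv_lhs => rw [← List.take_append_drop
      ((PySem.Chars.find content.toList pvmEL).toNat + 42)
      (content.toList.take (PySem.Chars.find content.toList pvmLS).toNat)]
    rw [List.take_take, min_eq_left (by omega)]
  have hspaces : ∀ c ∈ (content.toList.take
        (PySem.Chars.find content.toList pvmLS).toNat).drop
        ((PySem.Chars.find content.toList pvmEL).toNat + 42),
      PySem.Chars.isspace c = true := by
    intro c hc
    rw [List.drop_eq_getElem_cons (by simp only [List.length_take]; omega)] at hc
    rcases List.mem_cons.mp hc with hhd | htl
    · subst hhd
      rw [List.getElem_take, hv42]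
      decide
    · rw [List.all_eq_true] at hall
      exact hall c htl
  have htake42 : content.toList.take ((PySem.Chars.find content.toList pvmEL).toNat + 42)
      = content.toList.take ((PySem.Chars.find content.toList pvmEL).toNat + 41)
        ++ [content.toList[(PySem.Chars.find content.toList pvmEL).toNat + 41]'(by omega)] := by
    rw [List.take_add_one, List.getElem?_eq_getElem (by omega)]
    rfl
  have hc1 : PySem.Chars.rstrip (content.toList.take
        (PySem.Chars.find content.toList pvmLS).toNat)
      = content.toList.take ((PySem.Chars.find content.toList pvmEL).toNat + 42) := by
    rw [hsplit, pv_rstrip_append_spaces _ _ hspaces, htake42,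
      pv_rstrip_concat_not_space _ _ (by rw [hv41]; decide), ← htake42]
  -- A's value inside D_: the prefix still ending in the dangling ELIM marker line
  have hA : pvStripGo (content.toList.length + 1) content.toList
      = content.toList.take ((PySem.Chars.find content.toList pvmEL).toNat + 42) := by
    rw [pv_go_succ, if_pos hL, PySem.List.slice_to _ hl0, hc1]
    exact pv_go_fix
      (pv_find_take_neg (by decide) (fun q hocc hq => hlmin q
        (by rw [show pvmLS.length = 41 from by decide] at hq; omega) hocc))
      (pv_find_take_neg (by decide) (fun q hocc hq => hemin q
        (by rw [show pvmEL.length = 43 from by decide] at hq; omega) hocc))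
      content.toList.length (by omega)
  -- B's value inside D_: everything before the ELIM marker, rstripped
  have hB : strip_prior_generated_block_py_alt content
      = String.ofList (PySem.Chars.rstrip (content.toList.take
          (PySem.Chars.find content.toList pvmEL).toNat)) := by
    rw [pv_alt_eval_both hL hE, if_pos hlt, PySem.List.slice_to _ he0]
  intro heq
  rw [show strip_prior_generated_block_py content
      = String.ofList (pvStripGo (content.toList.length + 1) content.toList) from rfl,
    hA, hB] at heq
  have heql := congrArg String.toList heq
  rw [String.toList_ofList, String.toList_ofList] at heql
  have hlen := congrArg List.length heql
  have hr := pv_rstrip_length_le (content.toList.take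
      (PySem.Chars.find content.toList pvmEL).toNat)
  simp only [List.length_take] at hlen hr
  omega
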